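-- pv_equiv track=rewrite | github.com/stevedoyle/mytime | myday.py | summarize_by_focus
-- ===== SOURCE A (Python) =====
-- from typing import List, Dict
-- from collections import defaultdict
--
-- def summarize_by_focus(type_totals: Dict[str, int]) -> Dict[str, int]:
--     """Summarize total time by productivity focus."""
--     focus_totals = defaultdict(int)
--
--     for type_name, minutes in type_totals.items():
--         if type_name in ["Task", "Learning"]:
--             focus_totals["Deep"] += minutes
--         elif type_name in ["Meeting"]:
--             focus_totals["Meeting"] += minutes
--         elif type_name in ["Comms", "Admin"]:
--             focus_totals["Shallow"] += minutes
--
--     return dict(focus_totals)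
-- ===== SOURCE B (Python) =====
-- FOCUS_OF = {"Task": "Deep", "Learning": "Deep", "Meeting": "Meeting",
--             "Comms": "Shallow", "Admin": "Shallow"}
--
-- def summarize_by_focus(type_totals):
--     """Summarize total time by productivity focus: label each type with its
--     focus category, then group-by the labels in first-appearance order."""
--     labeled = [(FOCUS_OF[t], m) for t, m in type_totals.items() if t in FOCUS_OF]
--     order = list(dict.fromkeys(f for f, _ in labeled))
--     return {f: sum(m for g, m in labeled if g == f) for f in order}
-- ===== Notes on version B (the rewrite author's own statement) =====
-- stated objective: alternative
-- what changed: Replaces A's single accumulating pass with if/elif branches and a defaultdict by a map/group-by decomposition: label each type via a type->focus table, dedupe the labels in first-appearance order, and build each focus total as a sum over the labeled list.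
import Mathlib
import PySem

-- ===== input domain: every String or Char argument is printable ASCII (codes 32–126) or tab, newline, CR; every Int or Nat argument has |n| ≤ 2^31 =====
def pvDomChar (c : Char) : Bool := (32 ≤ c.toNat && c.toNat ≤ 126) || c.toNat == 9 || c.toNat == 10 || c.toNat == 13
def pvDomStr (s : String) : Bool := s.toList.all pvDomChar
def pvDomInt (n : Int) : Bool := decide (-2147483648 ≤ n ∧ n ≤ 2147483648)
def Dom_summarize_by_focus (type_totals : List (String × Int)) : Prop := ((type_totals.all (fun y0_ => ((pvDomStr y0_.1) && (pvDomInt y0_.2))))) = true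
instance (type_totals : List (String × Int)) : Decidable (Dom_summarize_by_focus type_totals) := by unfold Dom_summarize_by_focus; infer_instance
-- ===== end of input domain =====

-- B replaces the flat if/elif accumulation pass by a label-then-group-by decomposition (same cost).

-- ===== PORT A =====
def summarize_by_focus (type_totals : List (String × Int)) : List (String × Int) :=
  (type_totals.foldl (fun (d : PySem.Dict String Int) p =>
      if p.1 = "Task" ∨ p.1 = "Learning" then d.modify "Deep" 0 (· + p.2)
      else if p.1 = "Meeting" then d.modify "Meeting" 0 (· + p.2)
      else if p.1 = "Comms" ∨ p.1 = "Admin" then d.modify "Shallow" 0 (· + p.2)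
      else d) PySem.Dict.empty).items

-- ===== PORT B =====
def pvFocusOf : PySem.Dict String String :=
  PySem.Dict.ofList [("Task", "Deep"), ("Learning", "Deep"), ("Meeting", "Meeting"),
                     ("Comms", "Shallow"), ("Admin", "Shallow")]

def summarize_by_focus_alt (type_totals : List (String × Int)) : List (String × Int) :=
  let labeled := (type_totals.filter (fun p => pvFocusOf.contains p.1)).map
      (fun p => (pvFocusOf.getD p.1 "", p.2))
  let order := PySem.List.dedup (labeled.map (·.1))
  order.map (fun f => (f, ((labeled.filter (fun q => q.1 == f)).map (·.2)).sum))

-- ===== PRECONDITION & SPEC =====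
def Spec_summarize_by_focus (type_totals : List (String × Int)) (out : List (String × Int)) : Prop := out = summarize_by_focus_alt type_totals
instance (type_totals : List (String × Int)) (out : List (String × Int)) : Decidable (Spec_summarize_by_focus type_totals out) := by unfold Spec_summarize_by_focus; infer_instance

-- ===== CLAIM (what is proved, stated in full; the proofs are below) =====
def Claim_equal_summarize_by_focus : Prop := ∀ (type_totals : List (String × Int)), Dom_summarize_by_focus type_totals → Spec_summarize_by_focus type_totals (summarize_by_focus type_totals)

-- ===== LEMMAS AND PROOFS =====

-- A's loop body and B's labeled list, named for the proofs.
def pvStep (d : PySem.Dict String Int) (q : String × Int) : PySem.Dict String Int :=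
  d.modify q.1 0 (· + q.2)

def pvLab (tt : List (String × Int)) : List (String × Int) :=
  (tt.filter (fun p => pvFocusOf.contains p.1)).map (fun p => (pvFocusOf.getD p.1 "", p.2))

-- A's classification fold over the raw list is the plain accumulate fold over the labeled list.
theorem pv_fold_transport (tt : List (String × Int)) (d : PySem.Dict String Int) :
    tt.foldl (fun (d : PySem.Dict String Int) p =>
      if p.1 = "Task" ∨ p.1 = "Learning" then d.modify "Deep" 0 (· + p.2)
      else if p.1 = "Meeting" then d.modify "Meeting" 0 (· + p.2)
      else if p.1 = "Comms" ∨ p.1 = "Admin" then d.modify "Shallow" 0 (· + p.2)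
      else d) d = (pvLab tt).foldl pvStep d := by
  induction tt generalizing d with
  | nil => rfl
  | cons p rest ih =>
    obtain ⟨s, m⟩ := p
    by_cases h1 : s = "Task"
    · subst h1; simp [pvLab, pvFocusOf, PySem.Dict.ofList, List.foldl, ih]; rfl
    · by_cases h2 : s = "Learning"
      · subst h2; simp [pvLab, pvFocusOf, PySem.Dict.ofList, List.foldl, h1, ih]; rfl
      · by_cases h3 : s = "Meeting"
        · subst h3; simp [pvLab, pvFocusOf, PySem.Dict.ofList, List.foldl, h1, h2, ih]; rfl
        · by_cases h4 : s = "Comms"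
          · subst h4; simp [pvLab, pvFocusOf, PySem.Dict.ofList, List.foldl, h1, h2, h3, ih]; rfl
          · by_cases h5 : s = "Admin"
            · subst h5; simp [pvLab, pvFocusOf, PySem.Dict.ofList, List.foldl, h1, h2, h3, h4, ih]; rfl
            · have hk : pvFocusOf.keys = ["Task", "Learning", "Meeting", "Comms", "Admin"] := by
                decide
              have hc : pvFocusOf.contains s = false := by
                rw [PySem.Dict.contains_eq_decide_mem_keys, hk]
                simp [h1, h2, h3, h4, h5]
              simp [pvLab, List.foldl, hc, h1, h2, h3, h4, h5, ih]

theorem pv_getD_fold (L : List (String × Int)) (d : PySem.Dict String Int) (k : String) :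
    (L.foldl pvStep d).getD k 0
      = d.getD k 0 + ((L.filter (fun q => q.1 == k)).map (·.2)).sum := by
  induction L generalizing d with
  | nil => simp
  | cons q rest ih =>
    by_cases h : q.1 = k
    · simp [List.foldl, pvStep, ih, h]
      ring
    · simp [List.foldl, pvStep, ih, PySem.Dict.getD_modify, h, Ne.symm h]

theorem pv_keys_fold (L : List (String × Int)) :
    (L.foldl pvStep PySem.Dict.empty).keys = PySem.Set.ofList (L.map (·.1)) := by
  have h := PySem.Dict.keys_foldl_modify_key (l := L) (key := Prod.fst)
      (d0 := (0 : Int)) (f := fun _ q => (· + q.2)) (d := PySem.Dict.empty)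
  simpa [pvStep, PySem.Set.update_nil_left] using h

theorem pv_items_eq (d : PySem.Dict String Int) (h : d.keys.Nodup) :
    d.items = d.keys.map (fun k => (k, d.getD k 0)) := by
  show d.items = (d.items.map (·.1)).map (fun k => (k, d.getD k 0))
  rw [List.map_map]
  have : ∀ p ∈ d.items, ((fun k => (k, d.getD k 0)) ∘ (·.1)) p = id p := by
    intro p hp
    have := PySem.Dict.getD_of_mem_items (k := p.1) (v := p.2) (d := d) (d0 := (0 : Int))
      (by simpa using hp) h
    simp [this]
  rw [List.map_congr_left this, List.map_id]

-- ===== VERDICT (by name: the statement is the Claim_ definition above) =====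
theorem summarize_by_focus_spec : Claim_equal_summarize_by_focus := by
  intro tt _
  unfold Spec_summarize_by_focus summarize_by_focus summarize_by_focus_alt
  rw [pv_fold_transport]
  have hnd : ((pvLab tt).foldl pvStep PySem.Dict.empty).keys.Nodup := by
    have := PySem.Dict.nodup_keys_foldl_modify_key (pvLab tt) Prod.fst (0 : Int)
      (fun _ q => (· + q.2)) PySem.Dict.empty (by simp)
    simpa [pvStep] using this
  rw [pv_items_eq _ hnd, pv_keys_fold]
  simp only [PySem.List.dedup_eq_ofList, pvLab]
  apply List.map_congr_left
  intro f _
  rw [pv_getD_fold]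
  simp
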